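-- pv_equiv track=rewrite | github.com/MattMossCSHL/to_the_mun | scripts/run_saved_rocket.py | counter_delta
-- ===== SOURCE A (Python) =====
-- def counter_delta(before, after):
--     removed = {}
--     added = {}
--     for name, count in before.items():
--         delta = count - after.get(name, 0)
--         if delta > 0:
--             removed[name] = delta
--     for name, count in after.items():
--         delta = count - before.get(name, 0)
--         if delta > 0:
--             added[name] = delta
--     return removed, added
-- ===== SOURCE B (Python) =====
-- def counter_delta(before, after):
--     # One signed-delta dict built once, then two filters (removed in before order,
--     # added in after order), instead of two independent passes with cross lookups.
--     delta = dict(before)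
--     for name, count in after.items():
--         delta[name] = delta.get(name, 0) - count
--     removed = {name: d for name, d in delta.items() if name in before and d > 0}
--     added = {name: -delta[name] for name in after if delta[name] < 0}
--     return removed, added
-- ===== Notes on version B (the rewrite author's own statement) =====
-- stated objective: alternative
-- what changed: B builds a single signed-delta dict (before minus after) in one merge pass and derives both result dicts from it by filtering (removed = positive deltas at keys of before, added = negated negative deltas iterated in after's order), instead of A's two independent passes each doing cross lookups into the other dict.
import Mathlib
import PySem

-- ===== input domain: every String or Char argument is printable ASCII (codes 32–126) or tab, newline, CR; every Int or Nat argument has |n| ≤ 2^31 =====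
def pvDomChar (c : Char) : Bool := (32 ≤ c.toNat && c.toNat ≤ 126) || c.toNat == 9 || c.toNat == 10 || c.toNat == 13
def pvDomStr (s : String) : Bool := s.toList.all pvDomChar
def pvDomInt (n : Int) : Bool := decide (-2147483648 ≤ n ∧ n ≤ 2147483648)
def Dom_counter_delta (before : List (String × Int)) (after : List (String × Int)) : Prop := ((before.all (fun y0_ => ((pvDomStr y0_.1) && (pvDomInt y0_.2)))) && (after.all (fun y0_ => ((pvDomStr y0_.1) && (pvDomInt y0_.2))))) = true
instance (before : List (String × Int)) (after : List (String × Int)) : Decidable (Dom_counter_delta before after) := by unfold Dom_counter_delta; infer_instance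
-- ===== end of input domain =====

-- B builds one signed-delta dict and derives both result dicts from it by filtering
-- (objective: alternative decomposition); A makes two independent passes with cross lookups.

-- ===== PORT A =====
def counter_delta (before : List (String × Int)) (after : List (String × Int)) : (List (String × Int)) × (List (String × Int)) :=
  let removed := before.foldl (fun r p =>
    if 0 < p.2 - (PySem.Dict.mk after).getD p.1 0 then r.insert p.1 (p.2 - (PySem.Dict.mk after).getD p.1 0) else r) PySem.Dict.empty
  let added := after.foldl (fun r p =>
    if 0 < p.2 - (PySem.Dict.mk before).getD p.1 0 then r.insert p.1 (p.2 - (PySem.Dict.mk before).getD p.1 0) else r) PySem.Dict.empty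
  (removed.items, added.items)

-- ===== PORT B =====
def counter_delta_alt (before : List (String × Int)) (after : List (String × Int)) : (List (String × Int)) × (List (String × Int)) :=
  let delta := after.foldl (fun d p => d.insert p.1 (d.getD p.1 0 - p.2)) (PySem.Dict.mk before)
  let removed := delta.items.filter (fun p => (PySem.Dict.mk before).contains p.1 && decide (0 < p.2))
  -- `delta[name]` always succeeds in Source B (every `after` key was inserted): getD 0 is exact here
  let added := after.filterMap (fun p => if delta.getD p.1 0 < 0 then some (p.1, -(delta.getD p.1 0)) else none)
  (removed, added)

-- ===== PRECONDITION & SPEC =====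
-- Pre_ excludes association lists with duplicate keys: both arguments are Python dicts,
-- which cannot contain duplicate keys, so such lists represent no Python input.
def Pre_counter_delta (before : List (String × Int)) (after : List (String × Int)) : Prop :=
  (before.map Prod.fst).Nodup ∧ (after.map Prod.fst).Nodup
instance (before : List (String × Int)) (after : List (String × Int)) : Decidable (Pre_counter_delta before after) := by unfold Pre_counter_delta; infer_instance
def pvWitness_counter_delta : (List (String × Int)) × (List (String × Int)) :=
  ([("a", 3), ("b", 1)], [("b", 2), ("c", 1)])
def Spec_counter_delta (before : List (String × Int)) (after : List (String × Int)) (out : (List (String × Int)) × (List (String × Int))) : Prop := out = counter_delta_alt before after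
instance (before : List (String × Int)) (after : List (String × Int)) (out : (List (String × Int)) × (List (String × Int))) : Decidable (Spec_counter_delta before after out) := by unfold Spec_counter_delta; infer_instance

-- ===== CLAIM (what is proved, stated in full; the proofs are below) =====
def Claim_equal_counter_delta : Prop := ∀ (before : List (String × Int)) (after : List (String × Int)), Dom_counter_delta before after → Pre_counter_delta before after → Spec_counter_delta before after (counter_delta before after)

-- ===== LEMMAS AND PROOFS =====

-- A's conditional-insert loop over distinct fresh keys appends its hits in order.
theorem items_foldl_cond_insert (l : List (String × Int)) (c : String × Int → Prop)
    [DecidablePred c] (v : String × Int → Int) (acc : PySem.Dict String Int)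
    (hnd : acc.keys.Nodup) (hln : (l.map Prod.fst).Nodup)
    (hdisj : ∀ p ∈ l, acc.contains p.1 = false) :
    (l.foldl (fun r p => if c p then r.insert p.1 (v p) else r) acc).items
      = acc.items ++ l.filterMap (fun p => if c p then some (p.1, v p) else none) := by
  induction l generalizing acc with
  | nil => simp
  | cons p rest ih =>
    simp only [List.map_cons, List.nodup_cons] at hln
    simp only [List.foldl_cons, List.filterMap_cons]
    by_cases hc : c p
    · rw [if_pos hc, if_pos hc,
        ih (acc.insert p.1 (v p)) (PySem.Dict.nodup_keys_insert _ _ _ hnd) hln.2 ?_]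
      · rw [PySem.Dict.items_insert_of_not_contains acc (v p) (hdisj p (by simp))]
        simp
      · intro q hq
        have hne : (q.1 == p.1) = false := by
          simp only [beq_eq_false_iff_ne, ne_eq]
          intro h
          exact hln.1 (h ▸ (List.mem_map.mpr ⟨q, hq, rfl⟩))
        rw [PySem.Dict.contains_insert, hne, Bool.false_or]
        exact hdisj q (by simp [hq])
    · rw [if_neg hc, if_neg hc]
      exact ih acc hnd hln.2 (fun q hq => hdisj q (by simp [hq]))

-- B's delta loop computes before.get(n,0) - after.get(n,0) at every key.
theorem getD_delta_fold (l : List (String × Int)) (d : PySem.Dict String Int) (n : String)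
    (hln : (l.map Prod.fst).Nodup) :
    (l.foldl (fun d p => d.insert p.1 (d.getD p.1 0 - p.2)) d).getD n 0
      = d.getD n 0 - (PySem.Dict.mk l).getD n 0 := by
  induction l generalizing d with
  | nil => simp [PySem.Dict.getD, PySem.Dict.get?]
  | cons p rest ih =>
    obtain ⟨k, w⟩ := p
    simp only [List.map_cons, List.nodup_cons] at hln
    simp only [List.foldl_cons]
    rw [ih _ hln.2]
    have hmk : (PySem.Dict.mk ((k, w) :: rest)).getD n 0
        = if (k == n) = true then w else (PySem.Dict.mk rest).getD n 0 := by
      rw [PySem.Dict.getD_eq_get?_getD, PySem.Dict.get?_mk_cons]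
      by_cases h : (k == n) = true
      · simp [h]
      · simp [h, PySem.Dict.getD_eq_get?_getD]
    by_cases h : n = k
    · subst h
      have hnr : (PySem.Dict.mk rest).getD n 0 = 0 := by
        apply PySem.Dict.getD_of_not_contains
        rw [PySem.Dict.contains_eq_decide_mem_keys, PySem.Dict.keys_mk,
          decide_eq_false_iff_not]
        exact hln.1
      rw [PySem.Dict.getD_insert_self, hmk, hnr]
      simp
    · rw [PySem.Dict.getD_insert_of_ne _ _ _ h, hmk]
      have hne : (k == n) = false := beq_eq_false_iff_ne.mpr (fun e => h e.symm)
      rw [hne]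
      simp

-- filter-after-map is a filterMap over the source list.
theorem filter_map_eq_filterMap {α β : Type} (l : List α) (f : α → β) (c : β → Bool) :
    (l.map f).filter c = l.filterMap (fun a => if c (f a) then some (f a) else none) := by
  induction l with
  | nil => rfl
  | cons a l ih =>
    simp only [List.map_cons, List.filter_cons, List.filterMap_cons]
    by_cases h : c (f a) <;> simp [h, ih]

theorem counter_delta_spec : Claim_equal_counter_delta := by
  intro before after _hdom hpre
  obtain ⟨hb, ha⟩ := hpre
  show _ = _
  simp only [counter_delta, counter_delta_alt]
  have hbkeys : (PySem.Dict.mk before).keys = before.map Prod.fst := rfl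
  have hbnd : (PySem.Dict.mk before).keys.Nodup := by rw [hbkeys]; exact hb
  have hand : (PySem.Dict.mk after).keys.Nodup := ha
  set delta := after.foldl (fun d p => d.insert p.1 (d.getD p.1 0 - p.2)) (PySem.Dict.mk before) with hdelta
  have hdnd : delta.keys.Nodup :=
    PySem.Dict.nodup_keys_foldl_insert_key after Prod.fst _ _ hbnd
  have hdkeys : delta.keys = PySem.Set.update (before.map Prod.fst) (after.map Prod.fst) := by
    rw [hdelta, PySem.Dict.keys_foldl_insert_key, hbkeys]
  have hdget : ∀ n, delta.getD n 0
      = (PySem.Dict.mk before).getD n 0 - (PySem.Dict.mk after).getD n 0 :=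
    fun n => getD_delta_fold after _ n ha
  refine Prod.ext ?_ ?_
  · -- removed components
    show (before.foldl _ PySem.Dict.empty).items = delta.items.filter _
    rw [items_foldl_cond_insert before
        (fun p => 0 < p.2 - (PySem.Dict.mk after).getD p.1 0)
        (fun p => p.2 - (PySem.Dict.mk after).getD p.1 0) PySem.Dict.empty
        (by simp [PySem.Dict.keys_empty]) hb
        (fun p _ => PySem.Dict.contains_empty p.1)]
    rw [PySem.Dict.items_eq_map_keys delta hdnd 0, hdkeys,
      PySem.Set.update_eq_append_filter, List.map_append, List.filter_append]
    have h2 : (((PySem.Set.ofList (after.map Prod.fst)).filter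
        (fun y => !(PySem.Set.contains (before.map Prod.fst) y))).map
        (fun k => (k, delta.getD k 0))).filter
        (fun p => (PySem.Dict.mk before).contains p.1 && decide (0 < p.2)) = [] := by
      rw [List.filter_eq_nil_iff]
      intro p hp
      obtain ⟨k, hk, rfl⟩ := List.mem_map.mp hp
      have hkn := (List.mem_filter.mp hk).2
      have hcf : (PySem.Dict.mk before).contains k = false := by
        rw [PySem.Dict.contains_eq_decide_mem_keys, hbkeys]
        simpa [PySem.Set.contains] using hkn
      simp [hcf]
    rw [h2, List.append_nil, filter_map_eq_filterMap, List.filterMap_map]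
    have hemp : (PySem.Dict.empty : PySem.Dict String Int).items = [] := rfl
    rw [hemp, List.nil_append]
    apply List.filterMap_congr
    intro p hp
    dsimp only [Function.comp]
    have hmem : p.1 ∈ before.map Prod.fst := List.mem_map.mpr ⟨p, hp, rfl⟩
    have hcont : (PySem.Dict.mk before).contains p.1 = true := by
      rw [PySem.Dict.contains_eq_decide_mem_keys, hbkeys]; simpa using hmem
    have hval : (PySem.Dict.mk before).getD p.1 0 = p.2 :=
      PySem.Dict.getD_of_mem_items _ (by simpa [PySem.Dict.items] using hp) hbnd 0
    rw [hdget p.1, hval, hcont]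
    simp
  · -- added components
    show (after.foldl _ PySem.Dict.empty).items = after.filterMap _
    rw [items_foldl_cond_insert after
        (fun p => 0 < p.2 - (PySem.Dict.mk before).getD p.1 0)
        (fun p => p.2 - (PySem.Dict.mk before).getD p.1 0) PySem.Dict.empty
        (by simp [PySem.Dict.keys_empty]) ha
        (fun p _ => PySem.Dict.contains_empty p.1)]
    have hemp : (PySem.Dict.empty : PySem.Dict String Int).items = [] := rfl
    rw [hemp, List.nil_append]
    apply List.filterMap_congr
    intro p hp
    have hval : (PySem.Dict.mk after).getD p.1 0 = p.2 :=
      PySem.Dict.getD_of_mem_items _ (by simpa [PySem.Dict.items] using hp) hand 0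
    rw [hdget p.1, hval]
    by_cases h : 0 < p.2 - (PySem.Dict.mk before).getD p.1 0
    · rw [if_pos h, if_pos (by omega)]
      simp only [neg_sub]
    · rw [if_neg h, if_neg (by omega)]
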